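-- pv_equiv track=rewrite | github.com/jeremylynch83/drjeremylynch | build.py | _pick_count_for_full_row
-- ===== SOURCE A (Python) =====
-- def _tile_width_at(index: int) -> int:
--     """
--     Desktop grid column width for the tile at position index (0-based).
--     Pattern used by render_feature_cards: hero, sm, sm, wide, sm, tall.
--     hero/wide = 8 cols, sm/tall = 4 cols on a 12-col grid.
--     """
--     pattern = [8, 4, 4, 8, 4, 4]
--     return pattern[index % len(pattern)]
--
-- def _pick_count_for_full_row(total_items: int, target: int = 10, min_items: int = 6, grid_cols: int = 12) -> int:
--     """
--     Choose how many items to show so the total width of the chosen tiles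
--     is a multiple of grid_cols. Guarantees at least min_items if available.
--     Picks a value near 'target' when several fit.
--     """
--     if total_items <= 0:
--         return 0
--
--     lower = min(total_items, max(min_items, 1))
--     upper = total_items
--
--     def prefix_mod(n: int) -> int:
--         s = 0
--         for i in range(n):
--             s += _tile_width_at(i)
--         return s % grid_cols
--
--     # Candidate list around target first, then fill the rest
--     base = max(lower, min(target, upper))
--     probes = list(dict.fromkeys(
--         [base] +
--         [n for k in range(1, max(upper - lower, 1) + 1) for n in (base - k, base + k)]
--     ))
--     probes = [n for n in probes if lower <= n <= upper]
--
--     for n in probes: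
--         if prefix_mod(n) == 0:
--             return n
--
--     # Fallback: find the n with the smallest remainder distance to a full row
--     best_n = lower
--     best_gap = grid_cols
--     for n in range(lower, upper + 1):
--         r = prefix_mod(n)
--         gap = min(r, grid_cols - r)
--         if gap < best_gap or (gap == best_gap and abs(n - target) < abs(best_n - target)):
--             best_gap = gap
--             best_n = n
--     return best_n
-- ===== SOURCE B (Python) =====
-- def _pick_count_for_full_row(total_items: int, target: int = 10, min_items: int = 6, grid_cols: int = 12) -> int:
--     """
--     Same choice as A, but prefix widths come from the closed form
--     32*(n//6) + PART[n%6] of the periodic tile pattern (O(1) per query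
--     instead of an O(n) inner loop), and the candidate search walks
--     outward from 'base' directly instead of building a probe list.
--     """
--     if total_items <= 0:
--         return 0
--
--     lower = min(total_items, max(min_items, 1))
--     upper = total_items
--     base = max(lower, min(target, upper))
--
--     PART = [0, 8, 12, 16, 24, 28]  # prefix sums of one period [8,4,4,8,4,4]
--
--     def prefix_mod(n: int) -> int:
--         return (32 * (n // 6) + PART[n % 6]) % grid_cols
--
--     # Outward search from base: base, base-1, base+1, base-2, ...
--     if prefix_mod(base) == 0:
--         return base
--     for k in range(1, max(upper - lower, 1) + 1):
--         n = base - k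
--         if lower <= n and prefix_mod(n) == 0:
--             return n
--         n = base + k
--         if n <= upper and prefix_mod(n) == 0:
--             return n
--
--     # Fallback: smallest remainder distance to a full row, ties nearest target
--     best_n = lower
--     best_gap = grid_cols
--     for n in range(lower, upper + 1):
--         r = prefix_mod(n)
--         gap = min(r, grid_cols - r)
--         if gap < best_gap or (gap == best_gap and abs(n - target) < abs(best_n - target)):
--             best_gap = gap
--             best_n = n
--     return best_n
-- ===== Notes on version B (the rewrite author's own statement) =====
-- stated objective: faster
-- what changed: B replaces A's O(n) inner prefix-sum loop by the closed form 32*(n//6)+PART[n%6] of the periodic tile pattern (O(1) per query) and walks outward from base directly instead of materialising and deduplicating a probe list; Pre_ only excludes grid_cols == 0 with total_items > 0, where both A and B raise ZeroDivisionError.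
import Mathlib
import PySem

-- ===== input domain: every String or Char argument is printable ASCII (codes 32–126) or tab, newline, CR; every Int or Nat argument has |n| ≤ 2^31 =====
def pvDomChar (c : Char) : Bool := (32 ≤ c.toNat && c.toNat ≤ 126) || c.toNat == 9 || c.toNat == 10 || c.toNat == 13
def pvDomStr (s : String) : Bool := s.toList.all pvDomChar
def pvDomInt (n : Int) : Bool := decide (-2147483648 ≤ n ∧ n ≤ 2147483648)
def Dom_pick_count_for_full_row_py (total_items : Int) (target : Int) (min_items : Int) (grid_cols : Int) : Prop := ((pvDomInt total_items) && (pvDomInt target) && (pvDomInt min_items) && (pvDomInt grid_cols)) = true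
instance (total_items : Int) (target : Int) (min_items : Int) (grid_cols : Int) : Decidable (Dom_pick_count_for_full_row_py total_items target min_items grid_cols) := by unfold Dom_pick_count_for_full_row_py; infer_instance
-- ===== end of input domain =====

-- B replaces A's inner prefix-sum loop by a closed form over the periodic tile pattern
-- and searches outward from base directly instead of building a deduplicated probe list
-- (objective: faster).

-- ===== PORT A =====
-- _tile_width_at: 'index % 6' is always within [0,6), so the Python lookup never raises
-- IndexError and pyGetD's default 0 is never taken — the port is exact.
def tile_width_at (index : Int) : Int :=
  let pattern : List Int := [8, 4, 4, 8, 4, 4]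
  PySem.List.pyGetD pattern (PySem.Int.mod index (PySem.List.len pattern)) 0

-- the closure prefix_mod(n) of A (captures grid_cols)
def pickA_prefix_mod (grid_cols : Int) (n : Int) : Int :=
  PySem.Int.mod ((PySem.List.pyRange 0 n 1).foldl (fun s i => s + tile_width_at i) 0) grid_cols

def pick_count_for_full_row_py (total_items : Int) (target : Int) (min_items : Int) (grid_cols : Int) : Int :=
  if total_items ≤ 0 then 0
  else
    let lower := min total_items (max min_items 1)
    let upper := total_items
    let base := max lower (min target upper)
    -- list(dict.fromkeys(…)) is PySem.List.dedup
    let probes0 : List Int :=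
      PySem.List.dedup ([base] ++ (PySem.List.pyRange 1 (max (upper - lower) 1 + 1) 1).flatMap
        (fun k => [base - k, base + k]))
    let probes := probes0.filter (fun n => decide (lower ≤ n) && decide (n ≤ upper))
    -- 'for n in probes: if prefix_mod(n) == 0: return n'
    match probes.find? (fun n => pickA_prefix_mod grid_cols n == 0) with
    | some n => n
    | none =>
      ((PySem.List.pyRange lower (upper + 1) 1).foldl
        (fun (st : Int × Int) n =>
          let r := pickA_prefix_mod grid_cols n
          let gap := min r (grid_cols - r)
          if gap < st.2 ∨ (gap = st.2 ∧ |n - target| < |st.1 - target|) then (n, gap) else st)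
        (lower, grid_cols)).1

-- ===== PORT B =====
-- B's prefix_mod: closed form; 'n % 6' is always within [0,6), so PART's default 0 is
-- never taken — the port is exact.
def pickB_prefix_mod (grid_cols : Int) (n : Int) : Int :=
  let part : List Int := [0, 8, 12, 16, 24, 28]
  PySem.Int.mod (32 * PySem.Int.floordiv n 6 + PySem.List.pyGetD part (PySem.Int.mod n 6) 0) grid_cols

-- B's outward loop 'for k in range(1, …)' with its two early returns
def pickB_spiral (grid_cols lower upper base : Int) : List Int → Option Int
  | [] => none
  | k :: ks =>
    if lower ≤ base - k ∧ pickB_prefix_mod grid_cols (base - k) = 0 then some (base - k)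
    else if base + k ≤ upper ∧ pickB_prefix_mod grid_cols (base + k) = 0 then some (base + k)
    else pickB_spiral grid_cols lower upper base ks

def pick_count_for_full_row_py_alt (total_items : Int) (target : Int) (min_items : Int) (grid_cols : Int) : Int :=
  if total_items ≤ 0 then 0
  else
    let lower := min total_items (max min_items 1)
    let upper := total_items
    let base := max lower (min target upper)
    if pickB_prefix_mod grid_cols base = 0 then base
    else
      match pickB_spiral grid_cols lower upper base
          (PySem.List.pyRange 1 (max (upper - lower) 1 + 1) 1) with
      | some n => n
      | none =>
        ((PySem.List.pyRange lower (upper + 1) 1).foldl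
          (fun (st : Int × Int) n =>
            let r := pickB_prefix_mod grid_cols n
            let gap := min r (grid_cols - r)
            if gap < st.2 ∨ (gap = st.2 ∧ |n - target| < |st.1 - target|) then (n, gap) else st)
          (lower, grid_cols)).1

-- ===== PRECONDITION & SPEC =====
-- Pre_ excludes exactly the inputs where Python A raises ZeroDivisionError:
-- grid_cols == 0 while total_items > 0 (B raises ZeroDivisionError there too).
def Pre_pick_count_for_full_row_py (total_items : Int) (target : Int) (min_items : Int) (grid_cols : Int) : Prop :=
  total_items ≤ 0 ∨ grid_cols ≠ 0
instance (total_items : Int) (target : Int) (min_items : Int) (grid_cols : Int) : Decidable (Pre_pick_count_for_full_row_py total_items target min_items grid_cols) := by unfold Pre_pick_count_for_full_row_py; infer_instance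

def pvWitness_pick_count_for_full_row_py : Int × Int × Int × Int := (20, 10, 6, 12)

def Spec_pick_count_for_full_row_py (total_items : Int) (target : Int) (min_items : Int) (grid_cols : Int) (out : Int) : Prop := out = pick_count_for_full_row_py_alt total_items target min_items grid_cols
instance (total_items : Int) (target : Int) (min_items : Int) (grid_cols : Int) (out : Int) : Decidable (Spec_pick_count_for_full_row_py total_items target min_items grid_cols out) := by unfold Spec_pick_count_for_full_row_py; infer_instance

-- ===== CLAIM (what is proved, stated in full; the proofs are below) =====
def Claim_equal_pick_count_for_full_row_py : Prop := ∀ (total_items : Int) (target : Int) (min_items : Int) (grid_cols : Int), Dom_pick_count_for_full_row_py total_items target min_items grid_cols → Pre_pick_count_for_full_row_py total_items target min_items grid_cols → Spec_pick_count_for_full_row_py total_items target min_items grid_cols (pick_count_for_full_row_py total_items target min_items grid_cols)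

-- ===== LEMMAS AND PROOFS =====

-- A's tile lookup at a nonnegative index, as a plain Nat-indexed lookup
lemma tile_closed (m : Nat) : tile_width_at (m : Int)
    = ([8, 4, 4, 8, 4, 4] : List Int).getD (m % 6) 0 := by
  simp only [tile_width_at, PySem.List.len]
  rw [show ([8, 4, 4, 8, 4, 4] : List Int).length = 6 from rfl,
      PySem.Int.mod_natCast m 6, PySem.List.pyGetD_natCast]

-- closed form for A's prefix sums of the periodic tile pattern
lemma sumA_closed (m : Nat) :
    (PySem.List.pyRange 0 (m : Int) 1).foldl (fun s i => s + tile_width_at i) 0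
      = 32 * ((m / 6 : Nat) : Int) + ([0, 8, 12, 16, 24, 28] : List Int).getD (m % 6) 0 := by
  induction m with
  | zero => simp [PySem.List.pyRange_one_eq_nil]
  | succ m ih =>
    have hcast : ((m + 1 : Nat) : Int) = (m : Int) + 1 := by push_cast; ring
    rw [hcast, PySem.List.pyRange_one_succ_right (by positivity), List.foldl_append, ih]
    simp only [List.foldl_cons, List.foldl_nil]
    rw [tile_closed]
    have h6 : m % 6 = 0 ∨ m % 6 = 1 ∨ m % 6 = 2 ∨ m % 6 = 3 ∨ m % 6 = 4 ∨ m % 6 = 5 := by omega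
    rcases h6 with h | h | h | h | h | h
    · have ha : (m+1) % 6 = 1 := by omega
      have hb : (m+1)/6 = m/6 := by omega
      rw [h, ha, hb]; simp [List.getD]
    · have ha : (m+1) % 6 = 2 := by omega
      have hb : (m+1)/6 = m/6 := by omega
      rw [h, ha, hb]; simp [List.getD]; omega
    · have ha : (m+1) % 6 = 3 := by omega
      have hb : (m+1)/6 = m/6 := by omega
      rw [h, ha, hb]; simp [List.getD]; omega
    · have ha : (m+1) % 6 = 4 := by omega
      have hb : (m+1)/6 = m/6 := by omega
      rw [h, ha, hb]; simp [List.getD]; omega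
    · have ha : (m+1) % 6 = 5 := by omega
      have hb : (m+1)/6 = m/6 := by omega
      rw [h, ha, hb]; simp [List.getD]; omega
    · have ha : (m+1) % 6 = 0 := by omega
      have hb : (m+1)/6 = m/6 + 1 := by omega
      rw [h, ha, hb]; simp [List.getD]; ring

-- the two prefix_mod functions agree on nonnegative arguments
lemma pm_eq (gc n : Int) (hn : 0 ≤ n) : pickA_prefix_mod gc n = pickB_prefix_mod gc n := by
  obtain ⟨m, rfl⟩ := Int.eq_ofNat_of_zero_le hn
  simp only [pickA_prefix_mod, pickB_prefix_mod]
  rw [sumA_closed]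
  rw [show (6:Int) = ((6:Nat):Int) from rfl, PySem.Int.floordiv_natCast m 6,
      PySem.Int.mod_natCast m 6, PySem.List.pyGetD_natCast]

-- the probe list is bounded within (base-m, base+m) and has no duplicates
lemma probes_nodup_aux (base : Int) (m : Int) (hm : 1 ≤ m) :
    (∀ x ∈ (base :: (PySem.List.pyRange 1 m 1).flatMap (fun k => [base - k, base + k])),
        base - m < x ∧ x < base + m)
    ∧ (base :: (PySem.List.pyRange 1 m 1).flatMap (fun k => [base - k, base + k])).Nodup := by
  induction m, hm using Int.le_induction with
  | base =>
    rw [PySem.List.pyRange_one_eq_nil (le_refl 1)]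
    refine ⟨?_, by simp⟩
    intro x hx; simp at hx; subst hx; omega
  | succ m hm ih =>
    rw [PySem.List.pyRange_one_succ_right hm, List.flatMap_append,
        show [m].flatMap (fun k => [base - k, base + k]) = [base - m, base + m] by simp]
    obtain ⟨hb, hn⟩ := ih
    have hbase : base ∉ (PySem.List.pyRange 1 m 1).flatMap (fun k => [base - k, base + k]) :=
      (List.nodup_cons.mp hn).1
    have hflatnd : ((PySem.List.pyRange 1 m 1).flatMap (fun k => [base - k, base + k])).Nodup :=
      (List.nodup_cons.mp hn).2
    have hnotl : base - m ∉ (PySem.List.pyRange 1 m 1).flatMap (fun k => [base - k, base + k]) := by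
      intro hmem; have := hb (base - m) (List.mem_cons_of_mem _ hmem); omega
    have hnotr : base + m ∉ (PySem.List.pyRange 1 m 1).flatMap (fun k => [base - k, base + k]) := by
      intro hmem; have := hb (base + m) (List.mem_cons_of_mem _ hmem); omega
    constructor
    · intro x hx
      simp only [List.mem_cons, List.mem_append] at hx
      rcases hx with rfl | hx | hx
      · omega
      · have := hb x (List.mem_cons_of_mem _ hx); omega
      · simp at hx; rcases hx with rfl | rfl <;> omega
    · rw [List.nodup_cons]
      constructor
      · intro h
        rcases List.mem_append.mp h with h1 | h2
        · exact hbase h1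
        · simp at h2; rcases h2 with h | h <;> omega
      · rw [List.nodup_append]
        refine ⟨hflatnd, by simp; omega, ?_⟩
        intro x hx y hy
        simp only [List.mem_cons, List.not_mem_nil, or_false] at hy
        rcases hy with rfl | rfl
        · exact fun h => hnotl (h ▸ hx)
        · exact fun h => hnotr (h ▸ hx)

-- B's outward walk is first-match over A's flattened probe tail
lemma spiral_eq (gc lower upper base : Int) (hl : lower ≤ base) (hu : base ≤ upper)
    (ks : List Int) (hks : ∀ k ∈ ks, 1 ≤ k) :
    pickB_spiral gc lower upper base ks
      = (ks.flatMap (fun k => [base - k, base + k])).find?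
          (fun n => (decide (lower ≤ n) && decide (n ≤ upper)) && (pickB_prefix_mod gc n == 0)) := by
  induction ks with
  | nil => simp [pickB_spiral]
  | cons k ks ih =>
    have hk : 1 ≤ k := hks k (List.mem_cons_self ..)
    have hrest := ih (fun x hx => hks x (List.mem_cons_of_mem _ hx))
    simp only [List.flatMap_cons, List.cons_append, List.nil_append]
    rw [pickB_spiral]
    have h1 : base - k ≤ upper := by omega
    have h2 : lower ≤ base + k := by omega
    by_cases c1 : lower ≤ base - k ∧ pickB_prefix_mod gc (base - k) = 0
    · rw [if_pos c1]
      have : ((decide (lower ≤ base - k) && decide (base - k ≤ upper)) && (pickB_prefix_mod gc (base - k) == 0)) = true := by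
        simp [c1.1, c1.2, h1]
      rw [List.find?_cons_of_pos (by simpa using this)]
    · rw [if_neg c1]
      have hc1 : ((decide (lower ≤ base - k) && decide (base - k ≤ upper)) && (pickB_prefix_mod gc (base - k) == 0)) = false := by
        rcases not_and_or.mp c1 with h | h <;> simp [h]
      rw [List.find?_cons_of_neg (by simp only [hc1]; simp)]
      by_cases c2 : base + k ≤ upper ∧ pickB_prefix_mod gc (base + k) = 0
      · rw [if_pos c2]
        have : ((decide (lower ≤ base + k) && decide (base + k ≤ upper)) && (pickB_prefix_mod gc (base + k) == 0)) = true := by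
          simp [c2.1, c2.2, h2]
        rw [List.find?_cons_of_pos (by simpa using this)]
      · rw [if_neg c2]
        have hc2 : ((decide (lower ≤ base + k) && decide (base + k ≤ upper)) && (pickB_prefix_mod gc (base + k) == 0)) = false := by
          rcases not_and_or.mp c2 with h | h <;> simp [h]
        rw [List.find?_cons_of_neg (by simp only [hc2]; simp)]
        exact hrest

-- the two ports agree on every input (the ZeroDivisionError inputs are excluded by Pre_,
-- though both ports are total functions and agree everywhere)
lemma ports_agree (total_items target min_items grid_cols : Int) :
    pick_count_for_full_row_py total_items target min_items grid_cols
      = pick_count_for_full_row_py_alt total_items target min_items grid_cols := by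
  by_cases ht : total_items ≤ 0
  · simp [pick_count_for_full_row_py, pick_count_for_full_row_py_alt, ht]
  · simp only [pick_count_for_full_row_py, pick_count_for_full_row_py_alt, if_neg ht]
    set lower := min total_items (max min_items 1) with hlow
    set upper := total_items with hup
    set base := max lower (min target upper) with hbasedef
    set m := max (upper - lower) 1 + 1 with hmdef
    have hl1 : 1 ≤ lower := by rw [hlow]; omega
    have hlu : lower ≤ upper := by rw [hlow, hup]; omega
    have hlb : lower ≤ base := le_max_left _ _
    have hbu : base ≤ upper := by rw [hbasedef]; omega
    have hm1 : 1 ≤ m := by rw [hmdef]; omega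
    -- the probe list has no duplicates, so dict.fromkeys keeps it unchanged
    have hded : PySem.List.dedup (base :: (PySem.List.pyRange 1 m 1).flatMap
        (fun k => [base - k, base + k]))
        = base :: (PySem.List.pyRange 1 m 1).flatMap (fun k => [base - k, base + k]) := by
      rw [PySem.List.dedup_eq_ofList]
      exact PySem.Set.ofList_eq_self_of_nodup _ (probes_nodup_aux base m hm1).2
    simp only [List.singleton_append] at *
    rw [hded]
    -- fold the filter into the find? predicate
    rw [List.find?_filter]
    simp only [Bool.decide_and, Bool.decide_eq_true]
    -- the combined predicate may use B's prefix_mod: out-of-range n short-circuits to false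
    have hpred : (fun n => (decide (lower ≤ n) && decide (n ≤ upper)) && (pickA_prefix_mod grid_cols n == 0))
        = (fun n => (decide (lower ≤ n) && decide (n ≤ upper)) && (pickB_prefix_mod grid_cols n == 0)) := by
      funext n
      by_cases hin : lower ≤ n ∧ n ≤ upper
      · rw [pm_eq grid_cols n (by omega)]
      · rcases not_and_or.mp hin with h | h <;> simp [h]
    rw [hpred]
    -- split off the head probe = base
    rw [List.find?_cons]
    by_cases hb0 : pickB_prefix_mod grid_cols base = 0
    · have : ((decide (lower ≤ base) && decide (base ≤ upper)) && (pickB_prefix_mod grid_cols base == 0)) = true := by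
        simp [hlb, hbu, hb0]
      rw [this, if_pos hb0]
    · have hfalse : ((decide (lower ≤ base) && decide (base ≤ upper)) && (pickB_prefix_mod grid_cols base == 0)) = false := by
        simp [hb0]
      rw [hfalse, if_neg hb0]
      have hks : ∀ k ∈ PySem.List.pyRange 1 m 1, 1 ≤ k := by
        intro k hk; exact (PySem.List.mem_pyRange_one.mp hk).1
      rw [spiral_eq grid_cols lower upper base hlb hbu _ hks]
      -- same scrutinee; the fallback folds agree via pm_eq
      have hfold : ((PySem.List.pyRange lower (upper + 1) 1).foldl
            (fun (st : Int × Int) n =>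
              let r := pickA_prefix_mod grid_cols n
              let gap := min r (grid_cols - r)
              if gap < st.2 ∨ (gap = st.2 ∧ |n - target| < |st.1 - target|) then (n, gap) else st)
            (lower, grid_cols))
          = ((PySem.List.pyRange lower (upper + 1) 1).foldl
            (fun (st : Int × Int) n =>
              let r := pickB_prefix_mod grid_cols n
              let gap := min r (grid_cols - r)
              if gap < st.2 ∨ (gap = st.2 ∧ |n - target| < |st.1 - target|) then (n, gap) else st)
            (lower, grid_cols)) := by
        apply PySem.List.foldl_congr_mem
        intro acc n hn
        have hn1 : lower ≤ n := (PySem.List.mem_pyRange_one.mp hn).1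
        simp only [pm_eq grid_cols n (by omega)]
      cases hscrut : ((PySem.List.pyRange 1 m 1).flatMap (fun k => [base - k, base + k])).find?
          (fun n => (decide (lower ≤ n) && decide (n ≤ upper)) && (pickB_prefix_mod grid_cols n == 0)) with
      | some n => rfl
      | none => rw [hfold]

-- ===== VERDICT (by name: the statement is the Claim_ definition above) =====
theorem pick_count_for_full_row_py_spec : Claim_equal_pick_count_for_full_row_py := by
  intro total_items target min_items grid_cols _ _
  unfold Spec_pick_count_for_full_row_py
  exact ports_agree total_items target min_items grid_cols
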